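-- pv_equiv track=rewrite | github.com/hcenge/emigroupsite | scripts/process_issue.py | parse_issue_body
-- ===== SOURCE A (Python) =====
-- def parse_issue_body(body):
--     """Parse GitHub issue form body into {header: value} dict.
--
--     GitHub renders issue forms as:
--         ### Label\n\nValue\n\n### Next Label\n\n...
--     """
--     sections = {}
--     current_header = None
--     current_lines = []
--
--     for line in body.splitlines():
--         if line.startswith("### "):
--             if current_header is not None:
--                 sections[current_header] = "\n".join(current_lines).strip()
--             current_header = line[4:].strip()
--             current_lines = []
--         else:
--             current_lines.append(line)
--
--     if current_header is not None:
--         sections[current_header] = "\n".join(current_lines).strip()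
--
--     # Treat GitHub's empty-field sentinel as blank
--     for key in sections:
--         if sections[key] == "_No response_":
--             sections[key] = ""
--
--     return sections
-- ===== SOURCE B (Python) =====
-- def parse_issue_body(body):
--     """Parse GitHub issue form body into {header: value} dict."""
--     lines = body.splitlines()
--     # drop any preamble before the first header line
--     while lines and not lines[0].startswith("### "):
--         lines = lines[1:]
--     sections = {}
--     while lines:
--         header = lines[0][4:].strip()
--         rest = lines[1:]
--         chunk = []
--         while rest and not rest[0].startswith("### "):
--             chunk.append(rest[0])
--             rest = rest[1:]
--         value = "\n".join(chunk).strip()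
--         sections[header] = "" if value == "_No response_" else value
--         lines = rest
--     return sections
-- ===== Notes on version B (the rewrite author's own statement) =====
-- stated objective: alternative
-- what changed: Replaces A's single-pass state machine (current_header/current_lines accumulator plus a post-hoc sentinel-rewrite loop over the dict) by a chunked decomposition: skip the preamble, then repeatedly take a header line and the block of lines up to the next header, cleaning the '_No response_' sentinel at insertion time.
import Mathlib
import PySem

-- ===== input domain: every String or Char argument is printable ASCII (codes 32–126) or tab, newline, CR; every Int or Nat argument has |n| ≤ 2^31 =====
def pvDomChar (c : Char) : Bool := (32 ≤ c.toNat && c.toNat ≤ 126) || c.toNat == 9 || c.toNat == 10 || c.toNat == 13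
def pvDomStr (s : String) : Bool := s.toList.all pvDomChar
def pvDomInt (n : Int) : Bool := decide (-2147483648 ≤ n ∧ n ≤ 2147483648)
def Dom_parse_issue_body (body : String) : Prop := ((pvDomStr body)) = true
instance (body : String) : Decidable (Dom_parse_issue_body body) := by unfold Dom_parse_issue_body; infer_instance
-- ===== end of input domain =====

-- B parses the body as header-delimited chunks (skip preamble, then header line + block up to
-- the next header), cleaning the '_No response_' sentinel at insertion time, instead of A's
-- one-pass state machine with a trailing flush and a sentinel-rewrite loop over the dict.

-- shared helpers (both Pythons compute these same subexpressions)
def pvIsHeader (line : String) : Bool := PySem.Str.startswith line "### "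
def pvHdr (line : String) : String := PySem.Str.strip (PySem.Str.slice line (some 4) none)
def pvVal (ls : List String) : String := PySem.Str.strip (PySem.Str.join "\n" ls)

-- ===== PORT A =====
def aStep (st : PySem.Dict String String × Option String × List String) (line : String) :
    PySem.Dict String String × Option String × List String :=
  if pvIsHeader line then
    match st.2.1 with
    | some h => (st.1.insert h (pvVal st.2.2), some (pvHdr line), [])
    | none => (st.1, some (pvHdr line), [])
  else (st.1, st.2.1, st.2.2 ++ [line])

def aFlush (st : PySem.Dict String String × Option String × List String) :
    PySem.Dict String String :=
  match st.2.1 with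
  | some h => st.1.insert h (pvVal st.2.2)
  | none => st.1

-- 'for key in sections: if sections[key] == "_No response_": sections[key] = ""'
def aFix (d : PySem.Dict String String) : PySem.Dict String String :=
  d.keys.foldl (fun d k => if d.getD k "" == "_No response_" then d.insert k "" else d) d

def parse_issue_body (body : String) : List (String × String) :=
  (aFix (aFlush ((PySem.Str.splitlines body).foldl aStep (PySem.Dict.empty, none, [])))).items

-- ===== PORT B =====
def bClean (v : String) : String := if v == "_No response_" then "" else v

-- inner while loop: (chunk of non-header lines, remaining lines)
def bChunk : List String → List String × List String
  | [] => ([], [])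
  | l :: ls => if pvIsHeader l then ([], l :: ls) else
      ((bChunk ls).1.cons l, (bChunk ls).2)

theorem bChunk_snd_length : ∀ ls : List String, (bChunk ls).2.length ≤ ls.length := by
  intro ls
  induction ls with
  | nil => simp [bChunk]
  | cons l ls ih =>
    simp only [bChunk]
    split
    · simp
    · simpa using Nat.le_succ_of_le ih

-- outer while loop
def bGo : List String → PySem.Dict String String → PySem.Dict String String
  | [], d => d
  | l :: ls, d => bGo (bChunk ls).2 (d.insert (pvHdr l) (bClean (pvVal (bChunk ls).1)))
  termination_by ls => ls.length
  decreasing_by exact Nat.lt_succ_of_le (bChunk_snd_length ls)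

-- preamble-skipping while loop
def bSkip : List String → List String
  | [] => []
  | l :: ls => if pvIsHeader l then l :: ls else bSkip ls

def parse_issue_body_alt (body : String) : List (String × String) :=
  (bGo (bSkip (PySem.Str.splitlines body)) PySem.Dict.empty).items

-- ===== PRECONDITION & SPEC =====
def Spec_parse_issue_body (body : String) (out : List (String × String)) : Prop := out = parse_issue_body_alt body
instance (body : String) (out : List (String × String)) : Decidable (Spec_parse_issue_body body out) := by unfold Spec_parse_issue_body; infer_instance

-- ===== CLAIM (what is proved, stated in full; the proofs are below) =====
def Claim_equal_parse_issue_body : Prop := ∀ (body : String), Dom_parse_issue_body body → Spec_parse_issue_body body (parse_issue_body body)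

-- ===== LEMMAS AND PROOFS =====

-- raw (uncleaned) variant of bGo, the bridge between A's machine and B
def goRaw : List String → PySem.Dict String String → PySem.Dict String String
  | [], d => d
  | l :: ls, d => goRaw (bChunk ls).2 (d.insert (pvHdr l) (pvVal (bChunk ls).1))
  termination_by ls => ls.length
  decreasing_by exact Nat.lt_succ_of_le (bChunk_snd_length ls)

-- value-cleaning map on a dict
def mv (d : PySem.Dict String String) : PySem.Dict String String :=
  PySem.Dict.mk (d.items.map (fun p => (p.1, bClean p.2)))

theorem mv_contains (d : PySem.Dict String String) (k : String) :
    (mv d).contains k = d.contains k := by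
  simp only [mv, PySem.Dict.contains, List.any_map]
  rfl

theorem mv_insert (d : PySem.Dict String String) (k v : String) :
    mv (d.insert k v) = (mv d).insert k (bClean v) := by
  unfold PySem.Dict.insert
  rw [mv_contains]
  by_cases h : d.contains k = true
  · simp only [h, if_true, mv, List.map_map]
    congr 1
    apply List.map_congr_left
    intro p _
    by_cases hk : (p.1 == k) = true <;> simp [Function.comp, hk]
  · simp [h, mv]

theorem bGo_mv : ∀ (ls : List String) (d : PySem.Dict String String),
    bGo ls (mv d) = mv (goRaw ls d) := by
  intro ls d
  induction ls, d using goRaw.induct with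
  | case1 d => simp [bGo, goRaw]
  | case2 l ls d ih =>
    rw [bGo, goRaw, ← mv_insert]
    exact ih

theorem goRaw_nodup : ∀ (ls : List String) (d : PySem.Dict String String),
    d.keys.Nodup → (goRaw ls d).keys.Nodup := by
  intro ls d
  induction ls, d using goRaw.induct with
  | case1 d => intro h; simpa [goRaw] using h
  | case2 l ls d ih =>
    intro h
    rw [goRaw]
    exact ih (PySem.Dict.nodup_keys_insert _ _ _ h)

-- A's state machine from an active header equals the chunked recursion (raw values)
theorem machine_some : ∀ (ls : List String) (d : PySem.Dict String String) (h : String)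
    (acc : List String),
    aFlush (ls.foldl aStep (d, some h, acc)) =
      goRaw (bChunk ls).2 (d.insert h (pvVal (acc ++ (bChunk ls).1))) := by
  intro ls
  induction ls with
  | nil => intro d h acc; simp [aFlush, bChunk, goRaw]
  | cons l ls ih =>
    intro d h acc
    by_cases hl : pvIsHeader l = true
    · simp only [List.foldl_cons, aStep, hl, if_true, bChunk]
      rw [ih]
      simp [goRaw]
    · simp only [List.foldl_cons, aStep, hl, if_neg, Bool.not_eq_true, bChunk]
      rw [ih]
      simp [List.append_assoc]

theorem machine_none : ∀ (ls : List String) (d : PySem.Dict String String)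
    (acc : List String),
    aFlush (ls.foldl aStep (d, none, acc)) = goRaw (bSkip ls) d := by
  intro ls
  induction ls with
  | nil => intro d acc; simp [aFlush, bSkip, goRaw]
  | cons l ls ih =>
    intro d acc
    by_cases hl : pvIsHeader l = true
    · simp only [List.foldl_cons, aStep, hl, if_true, bSkip]
      rw [machine_some]
      simp [goRaw]
    · have hl' : pvIsHeader l = false := by simpa using hl
      simp only [List.foldl_cons, aStep, hl', Bool.false_eq_true, if_false, bSkip]
      exact ih d (acc ++ [l])

-- the sentinel-rewrite loop over the keys rewrites every value through bClean
theorem fix_aux : ∀ (post pre : List (String × String)),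
    ((pre ++ post).map Prod.fst).Nodup →
    (post.map Prod.fst).foldl
        (fun d k => if d.getD k "" == "_No response_" then d.insert k "" else d)
        (PySem.Dict.mk (pre ++ post)) =
      PySem.Dict.mk (pre ++ post.map (fun p => (p.1, bClean p.2))) := by
  intro post
  induction post with
  | nil => intro pre _; simp
  | cons p rest ih =>
    intro pre hnd
    obtain ⟨k, v⟩ := p
    have hnd' : (pre.map Prod.fst ++ k :: rest.map Prod.fst).Nodup := by
      simpa using hnd
    rw [List.nodup_append] at hnd'
    have hkpre : k ∉ pre.map Prod.fst := fun hk => hnd'.2.2 k hk k (by simp) rfl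
    have hkrest : k ∉ rest.map Prod.fst := by
      have := hnd'.2.1
      simp only [List.nodup_cons] at this
      exact this.1
    have hkeys : (PySem.Dict.mk (pre ++ (k, v) :: rest)).keys.Nodup := by
      simpa [PySem.Dict.keys] using hnd
    have hmem : (k, v) ∈ (PySem.Dict.mk (pre ++ (k, v) :: rest)).items := by simp
    have hget : (PySem.Dict.mk (pre ++ (k, v) :: rest)).getD k "" = v :=
      PySem.Dict.getD_of_mem_items _ hmem hkeys ""
    have hcont : (PySem.Dict.mk (pre ++ (k, v) :: rest)).contains k = true := by
      simp [PySem.Dict.contains]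
    simp only [List.map_cons, List.foldl_cons, hget]
    by_cases hv : (v == "_No response_") = true
    · have hveq : v = "_No response_" := by simpa using hv
      have hcl : bClean v = "" := by simp [bClean, hv]
      rw [if_pos hv]
      have hins : (PySem.Dict.mk (pre ++ (k, v) :: rest)).insert k "" =
          PySem.Dict.mk ((pre ++ [(k, "")]) ++ rest) := by
        unfold PySem.Dict.insert
        rw [if_pos hcont]
        congr 1
        simp only [List.map_append, List.map_cons, BEq.rfl, if_true]
        have hpre : pre.map (fun p => if (p.1 == k) = true then (k, "") else p) = pre := by
          have h1 : ∀ q ∈ pre, (if (q.1 == k) = true then (k, "") else q) = id q := by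
            intro q hq
            have : q.1 ≠ k := fun h => hkpre (h ▸ List.mem_map_of_mem hq)
            simp [this]
          simpa using List.map_congr_left h1
        have hrest : rest.map (fun p => if (p.1 == k) = true then (k, "") else p) = rest := by
          have h1 : ∀ q ∈ rest, (if (q.1 == k) = true then (k, "") else q) = id q := by
            intro q hq
            have : q.1 ≠ k := fun h => hkrest (h ▸ List.mem_map_of_mem hq)
            simp [this]
          simpa using List.map_congr_left h1
        rw [hpre, hrest]
        simp
      rw [hins, ih (pre ++ [(k, "")]) (by simpa using hnd)]
      simp [hcl]
    · rw [if_neg hv]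
      have hcl : bClean v = v := by simp [bClean, hv]
      have : pre ++ (k, v) :: rest = (pre ++ [(k, v)]) ++ rest := by simp
      rw [this, ih (pre ++ [(k, v)]) (by simpa using hnd)]
      simp [hcl]

theorem fix_eq_mv (d : PySem.Dict String String) (hnd : d.keys.Nodup) : aFix d = mv d := by
  unfold aFix mv
  have hd : d = PySem.Dict.mk d.items := rfl
  have : d.keys = d.items.map Prod.fst := rfl
  rw [this]
  calc (d.items.map Prod.fst).foldl
          (fun d k => if d.getD k "" == "_No response_" then d.insert k "" else d) d
      = (d.items.map Prod.fst).foldl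
          (fun d k => if d.getD k "" == "_No response_" then d.insert k "" else d)
          (PySem.Dict.mk ([] ++ d.items)) := by rw [List.nil_append, ← hd]
    _ = PySem.Dict.mk ([] ++ d.items.map (fun p => (p.1, bClean p.2))) := by
          apply fix_aux
          simpa [PySem.Dict.keys] using hnd
    _ = PySem.Dict.mk (d.items.map (fun p => (p.1, bClean p.2))) := by rw [List.nil_append]

theorem parse_issue_body_spec : Claim_equal_parse_issue_body := by
  intro body _
  unfold Spec_parse_issue_body parse_issue_body parse_issue_body_alt
  rw [machine_none]
  rw [fix_eq_mv _ (goRaw_nodup _ _ (by simp [PySem.Dict.keys, PySem.Dict.empty]))]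
  rw [← bGo_mv]
  congr 1
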